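-- pv_equiv track=rewrite | github.com/maksverver/AdventOfCode | 2023/22-fast.py | Part2
-- ===== SOURCE A (Python) =====
-- from functools import reduce
--
-- def Part2(supported_by):
--   depth  = [0]
--   answer = 0
--   ancestors = {(0, 0): 0}
--
--   def NthAncestorPowerOf2(x, k):
--     res = ancestors.get((x, k))
--     if res is None:
--       ancestors[x, k] = res = NthAncestorPowerOf2(NthAncestorPowerOf2(x, k - 1), k - 1)
--     return res
--
--   def NthAncestor(x, n):
--     k = 0
--     while (1 << k) <= n:
--       if n & (1 << k): x = NthAncestorPowerOf2(x, k)
--       k += 1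
--     return x
--
--   def Parent(x):
--     return ancestors[x, 0]
--
--   def LowestCommonAncestor(x, y):
--     n = depth[x]
--     m = depth[y]
--     if n > m: x = NthAncestor(x, n - m)
--     if m > n: y = NthAncestor(y, m - n)
--     if x == y: return x
--     k = 0
--     while NthAncestorPowerOf2(x, k) != NthAncestorPowerOf2(y, k):
--       k += 1
--     while k > 0:
--       k -= 1
--       a = NthAncestorPowerOf2(x, k)
--       b = NthAncestorPowerOf2(y, k)
--       if a != b: x, y = a, b
--     assert x != y and Parent(x) == Parent(y)
--     return Parent(x)
--
--   for i, s in enumerate(supported_by[1:], 1):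
--     ancestors[i, 0] = lca = reduce(LowestCommonAncestor, s)
--     depth.append((d := depth[lca]) + 1)
--     answer += d
--   return answer
-- ===== SOURCE B (Python) =====
-- def Part2(supported_by):
--   parent = [0]
--   depth = [0]
--   answer = 0
--
--   def Lca(x, y):
--     while depth[x] > depth[y]:
--       x = parent[x]
--     while depth[y] > depth[x]:
--       y = parent[y]
--     while x != y:
--       x = parent[x]
--       y = parent[y]
--     return x
--
--   for i in range(1, len(supported_by)):
--     s = supported_by[i]
--     lca = s[0]
--     for z in s[1:]:
--       lca = Lca(lca, z)
--     answer += depth[lca]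
--     parent.append(lca)
--     depth.append(depth[lca] + 1)
--   return answer
-- ===== Notes on version B (the rewrite author's own statement) =====
-- stated objective: simpler
-- what changed: Replaces A's memoised binary-lifting machinery (ancestors jump dict, NthAncestorPowerOf2, bit-decomposition NthAncestor, level-search and descending loops) by a naive pointer-climbing LCA that keeps only parent and depth lists: climb the deeper node to equal depth, then climb both together until they meet.
-- outside the precondition, e.g. on Part2([[], [7]]): A raises IndexError, B raises IndexError; on Part2([[], []]): A raises TypeError, B raises IndexError; on Part2([[], [-1]]): A returns 0, B returns 0
import Mathlib
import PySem

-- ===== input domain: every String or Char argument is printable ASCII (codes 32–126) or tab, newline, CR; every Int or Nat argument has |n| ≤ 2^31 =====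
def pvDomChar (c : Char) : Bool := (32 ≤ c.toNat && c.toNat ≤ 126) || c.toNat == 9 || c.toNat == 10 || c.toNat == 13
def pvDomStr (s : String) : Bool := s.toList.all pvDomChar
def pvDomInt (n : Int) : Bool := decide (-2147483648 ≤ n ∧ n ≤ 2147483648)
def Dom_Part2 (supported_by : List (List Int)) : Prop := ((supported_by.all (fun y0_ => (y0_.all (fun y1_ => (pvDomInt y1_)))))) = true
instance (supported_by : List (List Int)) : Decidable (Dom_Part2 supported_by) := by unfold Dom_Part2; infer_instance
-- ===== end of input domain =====

-- B replaces A's memoised binary-lifting LCA (jump dict + bit loops) by a naive parent/depth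
-- pointer-climbing LCA: simpler (no ancestors table), at the cost of O(n) per LCA query.
-- Equivalence of the RETURN value is proved on Pre_Part2 (valid supporter rows).

-- ===== PORT A =====
-- ancestors : dict keyed by (node, level)
abbrev ADict := PySem.Dict (Int × Int) Int

-- NthAncestorPowerOf2, memoised; fuel = number of recursion levels (callers pass the level k);
-- none = the infinite recursion Python runs into when the level-0 entry is missing.
def npo2 (anc : ADict) (x k : Int) (fuel : Nat) : Option (Int × ADict) :=
  match PySem.Dict.get? anc (x, k) with
  | some res => some (res, anc)
  | none =>
    match fuel with
    | 0 => none
    | f + 1 =>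
      match npo2 anc x (k - 1) f with
      | none => none
      | some (r1, anc1) =>
        match npo2 anc1 r1 (k - 1) f with
        | none => none
        | some (res, anc2) => some (res, PySem.Dict.insert anc2 (x, k) res)

-- the while-loop of NthAncestor; '1 << k' is ported as (2:Int)^k (exact for k ≥ 0, and k,
-- a counter starting at 0, is a Nat here); 'n & (1 << k)' is PySem.Int.band (Python-exact).
def nthLoop (anc : ADict) (x n : Int) (k fuel : Nat) : Option (Int × ADict) :=
  if (2 : Int) ^ k ≤ n then
    match fuel with
    | 0 => none
    | f + 1 =>
      match (if PySem.Int.band n ((2 : Int) ^ k) ≠ 0 then npo2 anc x (k : Int) k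
             else some (x, anc)) with
      | none => none
      | some (x', anc') => nthLoop anc' x' n (k + 1) f
  else some (x, anc)

-- the first while-loop of LowestCommonAncestor: find the first k with equal 2^k-ancestors
def searchK (anc : ADict) (x y : Int) (k fuel : Nat) : Option (Nat × ADict) :=
  match fuel with
  | 0 => none
  | f + 1 =>
    match npo2 anc x (k : Int) k with
    | none => none
    | some (a, anc1) =>
      match npo2 anc1 y (k : Int) k with
      | none => none
      | some (b, anc2) =>
        if a ≠ b then searchK anc2 x y (k + 1) f else some (k, anc2)

-- the second while-loop of LowestCommonAncestor (k counts down to 0)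
def descend (anc : ADict) (x y : Int) (k : Nat) : Option (Int × Int × ADict) :=
  match k with
  | 0 => some (x, y, anc)
  | k + 1 =>
    match npo2 anc x (k : Int) k with
    | none => none
    | some (a, anc1) =>
      match npo2 anc1 y (k : Int) k with
      | none => none
      | some (b, anc2) =>
        if a ≠ b then descend anc2 a b k else descend anc2 x y k

-- LowestCommonAncestor; depth[x] is pyGet? (negative wraparound, none = IndexError);
-- Parent(x) = ancestors[x, 0] (none = KeyError).
def alca (anc : ADict) (depth : List Int) (x y : Int) : Option (Int × ADict) :=
  match PySem.List.pyGet? depth x, PySem.List.pyGet? depth y with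
  | some n, some m =>
    match (if n > m then nthLoop anc x (n - m) 0 ((n - m).toNat + 2) else some (x, anc)) with
    | none => none
    | some (x1, anc1) =>
      match (if m > n then nthLoop anc1 y (m - n) 0 ((m - n).toNat + 2) else some (y, anc1)) with
      | none => none
      | some (y1, anc2) =>
        if x1 = y1 then some (x1, anc2)
        else
          match searchK anc2 x1 y1 0 (depth.length + 1) with
          | none => none
          | some (k, anc3) =>
            match descend anc3 x1 y1 k with
            | none => none
            | some (x2, _y2, anc4) =>
              match PySem.Dict.get? anc4 (x2, 0) with
              | none => none
              | some p => some (p, anc4)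
  | _, _ => none

-- reduce(LowestCommonAncestor, s) once the first element is taken as the accumulator
def afold (anc : ADict) (depth : List Int) (acc : Int) (s : List Int) : Option (Int × ADict) :=
  match s with
  | [] => some (acc, anc)
  | z :: t =>
    match alca anc depth acc z with
    | none => none
    | some (l, anc') => afold anc' depth l t

-- for i, s in enumerate(supported_by[1:], 1); none = reduce over an empty s (TypeError)
def amain (anc : ADict) (depth : List Int) (answer i : Int) (rows : List (List Int)) : Option Int :=
  match rows with
  | [] => some answer
  | s :: rest =>
    match s with
    | [] => none
    | h :: t =>
      match afold anc depth h t with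
      | none => none
      | some (lca, anc1) =>
        match PySem.List.pyGet? depth lca with
        | none => none
        | some d =>
          amain (PySem.Dict.insert anc1 (i, 0) lca) (depth ++ [d + 1]) (answer + d) (i + 1) rest

def Part2 (supported_by : List (List Int)) : Int :=
  (amain (PySem.Dict.insert PySem.Dict.empty ((0 : Int), (0 : Int)) 0) [0] 0 1
    (supported_by.drop 1)).getD 0

-- ===== PORT B =====
-- while depth[x] > depth[y]: x = parent[x]   (fuel-totalised; none = IndexError / divergence)
def bclimb (pl dl : List Int) (x y : Int) (fuel : Nat) : Option Int :=
  match PySem.List.pyGet? dl x, PySem.List.pyGet? dl y with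
  | some dx, some dy =>
    if dx > dy then
      match fuel with
      | 0 => none
      | f + 1 =>
        match PySem.List.pyGet? pl x with
        | none => none
        | some x' => bclimb pl dl x' y f
    else some x
  | _, _ => none

-- while x != y: x = parent[x]; y = parent[y]
def bjoint (pl : List Int) (x y : Int) (fuel : Nat) : Option Int :=
  if x = y then some x
  else
    match fuel with
    | 0 => none
    | f + 1 =>
      match PySem.List.pyGet? pl x, PySem.List.pyGet? pl y with
      | some x', some y' => bjoint pl x' y' f
      | _, _ => none

def blca (pl dl : List Int) (x y : Int) : Option Int :=
  match bclimb pl dl x y pl.length with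
  | none => none
  | some x1 =>
    match bclimb pl dl y x1 pl.length with
    | none => none
    | some y1 => bjoint pl x1 y1 pl.length

def bfold (pl dl : List Int) (acc : Int) (s : List Int) : Option Int :=
  match s with
  | [] => some acc
  | z :: t =>
    match blca pl dl acc z with
    | none => none
    | some l => bfold pl dl l t

def bmain (pl dl : List Int) (answer : Int) (rows : List (List Int)) : Option Int :=
  match rows with
  | [] => some answer
  | s :: rest =>
    match s with
    | [] => none
    | h :: t =>
      match bfold pl dl h t with
      | none => none
      | some lca =>
        match PySem.List.pyGet? dl lca with
        | none => none
        | some d => bmain (pl ++ [lca]) (dl ++ [d + 1]) (answer + d) rest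

def Part2_alt (supported_by : List (List Int)) : Int :=
  (bmain [0] [0] 0 (supported_by.drop 1)).getD 0

-- ===== PRECONDITION & SPEC =====
-- Pre_ excludes inputs whose supporter rows (beyond row 0, which both programs ignore) are empty
-- or mention an index that is not an already-processed brick (0 ≤ e < its own position): there A
-- raises TypeError/IndexError/KeyError or hits unbounded recursion, except that a lone negative
-- index wraps around Python-style — an accident of list indexing both implementations share.
def Pre_Part2 (supported_by : List (List Int)) : Prop :=
  ∀ q ∈ supported_by.zipIdx, 1 ≤ q.2 → q.1 ≠ [] ∧ ∀ e ∈ q.1, 0 ≤ e ∧ e < (q.2 : Int)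
instance (supported_by : List (List Int)) : Decidable (Pre_Part2 supported_by) := by
  unfold Pre_Part2; infer_instance

def pvWitness_Part2 : List (List Int) := [[], [0], [0, 1]]

def Spec_Part2 (supported_by : List (List Int)) (out : Int) : Prop := out = Part2_alt supported_by
instance (supported_by : List (List Int)) (out : Int) : Decidable (Spec_Part2 supported_by out) := by
  unfold Spec_Part2; infer_instance

-- ===== CLAIM (what is proved, stated in full; the proofs are below) =====
def Claim_equal_Part2 : Prop := ∀ (supported_by : List (List Int)), Dom_Part2 supported_by → Pre_Part2 supported_by → Spec_Part2 supported_by (Part2 supported_by)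

-- ===== LEMMAS AND PROOFS =====

-- The mathematical model: parent function pP on Nat indices, iterated parent itP, depth dN.
def pP (pl : List Int) (x : Nat) : Nat := (pl.getD x 0).toNat
def itP (pl : List Int) (n : Nat) (x : Nat) : Nat := (pP pl)^[n] x
def dN (dl : List Int) (x : Nat) : Nat := (dl.getD x 0).toNat

-- validity of the (parent, depth) structure both programs build
def Good (pl dl : List Int) : Prop :=
  pl.length = dl.length ∧ 0 < pl.length ∧ pl.getD 0 0 = 0 ∧ dl.getD 0 0 = 0 ∧
  ∀ x : Nat, 0 < x → x < pl.length →
    0 ≤ pl.getD x 0 ∧ (pl.getD x 0).toNat < x ∧ dl.getD x 0 = dl.getD (pl.getD x 0).toNat 0 + 1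

-- A's memo-dict invariant relative to the parent structure pl
def AncInv (anc : ADict) (pl : List Int) : Prop :=
  (∀ xi ki v, PySem.Dict.get? anc (xi, ki) = some v →
    ∃ x k : Nat, xi = (x : Int) ∧ ki = (k : Int) ∧ x < pl.length ∧ v = (itP pl (2 ^ k) x : Int)) ∧
  (∀ x : Nat, x < pl.length → PySem.Dict.get? anc ((x : Int), 0) = some ((pP pl x : Nat) : Int))

-- the minimal joint-climb meeting time: both programs' LCA value is itP pl j x at the MeetMin j
def MeetMin (pl : List Int) (x y j : Nat) : Prop :=
  itP pl j x = itP pl j y ∧ ∀ j' < j, itP pl j' x ≠ itP pl j' y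

theorem meetMin_unique {pl : List Int} {x y j j' : Nat} (h : MeetMin pl x y j)
    (h' : MeetMin pl x y j') : j = j' := by
  rcases lt_trichotomy j j' with h1 | h1 | h1
  · exact absurd h.1 (h'.2 j h1)
  · exact h1
  · exact absurd h'.1 (h.2 j' h1)

theorem itP_zero_fix (pl : List Int) (h : pl.getD 0 0 = 0) (n : Nat) : itP pl n 0 = 0 :=
  Function.iterate_fixed (by simp only [pP]; rw [h]; rfl) n

theorem good_pl_eq {pl dl : List Int} (hG : Good pl dl) {x : Nat} (hx : x < pl.length) :
    pl.getD x 0 = (pP pl x : Int) := by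
  rcases Nat.eq_zero_or_pos x with h0 | h0
  · subst h0; simp only [pP]; rw [hG.2.2.1]; rfl
  · have hnn := (hG.2.2.2.2 x h0 hx).1
    simp only [pP]
    exact (Int.toNat_of_nonneg hnn).symm

theorem good_P_lt {pl dl : List Int} (hG : Good pl dl) {x : Nat} (hx : x < pl.length) :
    pP pl x < pl.length := by
  rcases Nat.eq_zero_or_pos x with h0 | h0
  · subst h0
    have hp0 : pP pl 0 = 0 := by simp only [pP]; rw [hG.2.2.1]; rfl
    rw [hp0]; exact hG.2.1
  · exact lt_trans (hG.2.2.2.2 x h0 hx).2.1 hx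

theorem good_P_lt_self {pl dl : List Int} (hG : Good pl dl) {x : Nat} (hx0 : 0 < x)
    (hx : x < pl.length) : pP pl x < x := (hG.2.2.2.2 x hx0 hx).2.1

theorem good_it_lt {pl dl : List Int} (hG : Good pl dl) {x : Nat} (hx : x < pl.length) (n : Nat) :
    itP pl n x < pl.length := by
  induction n with
  | zero => simpa [itP] using hx
  | succ n ih =>
    have : itP pl (n + 1) x = pP pl (itP pl n x) := Function.iterate_succ_apply' _ n x
    rw [this]
    exact good_P_lt hG ih

theorem good_dl_nonneg {pl dl : List Int} (hG : Good pl dl) {x : Nat} (hx : x < pl.length) :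
    0 ≤ dl.getD x 0 := by
  induction x using Nat.strong_induction_on with
  | _ x ih =>
    rcases Nat.eq_zero_or_pos x with h0 | h0
    · subst h0; rw [hG.2.2.2.1]
    · have h5 := hG.2.2.2.2 x h0 hx
      rw [h5.2.2]
      have hplt : (pl.getD x 0).toNat < x := h5.2.1
      have := ih (pl.getD x 0).toNat hplt (lt_trans hplt hx)
      omega

theorem good_dl_eq {pl dl : List Int} (hG : Good pl dl) {x : Nat} (hx : x < pl.length) :
    dl.getD x 0 = (dN dl x : Int) := by
  simp only [dN]
  exact (Int.toNat_of_nonneg (good_dl_nonneg hG hx)).symm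

theorem good_dN_succ {pl dl : List Int} (hG : Good pl dl) {x : Nat} (hx0 : 0 < x)
    (hx : x < pl.length) : dN dl x = dN dl (pP pl x) + 1 := by
  have h5 := hG.2.2.2.2 x hx0 hx
  have hnn := good_dl_nonneg hG (good_P_lt hG hx)
  simp only [dN, pP] at *
  omega

theorem good_dN_zero {pl dl : List Int} (hG : Good pl dl) : dN dl 0 = 0 := by
  simp only [dN]; rw [hG.2.2.2.1]; rfl

theorem good_dN_le {pl dl : List Int} (hG : Good pl dl) {x : Nat} (hx : x < pl.length) :
    dN dl x ≤ x := by
  induction x using Nat.strong_induction_on with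
  | _ x ih =>
    rcases Nat.eq_zero_or_pos x with h0 | h0
    · subst h0; simp [good_dN_zero hG]
    · have hplt : pP pl x < x := good_P_lt_self hG h0 hx
      have := ih (pP pl x) hplt (lt_trans hplt hx)
      have := good_dN_succ hG h0 hx
      omega

theorem good_dN_it {pl dl : List Int} (hG : Good pl dl) {x : Nat} (hx : x < pl.length) (n : Nat) :
    dN dl (itP pl n x) = dN dl x - n := by
  induction n with
  | zero => simp [itP]
  | succ n ih =>
    have hstep : itP pl (n + 1) x = pP pl (itP pl n x) := Function.iterate_succ_apply' _ n x
    have hz : itP pl n x < pl.length := good_it_lt hG hx n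
    rcases Nat.eq_zero_or_pos (itP pl n x) with h0 | h0
    · rw [hstep, h0]
      have : pP pl 0 = 0 := by simp only [pP]; rw [hG.2.2.1]; rfl
      rw [this, good_dN_zero hG]
      rw [h0, good_dN_zero hG] at ih
      omega
    · have hsucc := good_dN_succ hG h0 hz
      rw [hstep]
      omega

theorem good_it_eq_zero {pl dl : List Int} (hG : Good pl dl) {x : Nat} (hx : x < pl.length)
    {n : Nat} (hn : dN dl x ≤ n) : itP pl n x = 0 := by
  have hz : itP pl (dN dl x) x = 0 := by
    have hd := good_dN_it hG hx (dN dl x)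
    have hlt : itP pl (dN dl x) x < pl.length := good_it_lt hG hx _
    by_contra hne
    have := good_dN_succ hG (Nat.pos_of_ne_zero hne) hlt
    omega
  have : n = (n - dN dl x) + dN dl x := by omega
  rw [this]
  show (pP pl)^[n - dN dl x + dN dl x] x = 0
  rw [Function.iterate_add_apply]
  have : (pP pl)^[dN dl x] x = 0 := hz
  rw [this]
  exact itP_zero_fix pl hG.2.2.1 _

theorem it_persist {pl : List Int} {x y j s : Nat} (h : itP pl j x = itP pl j y) (hjs : j ≤ s) :
    itP pl s x = itP pl s y := by
  obtain ⟨a, rfl⟩ : ∃ a, s = a + j := ⟨s - j, by omega⟩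
  show (pP pl)^[a + j] x = (pP pl)^[a + j] y
  rw [Function.iterate_add_apply, Function.iterate_add_apply]
  exact congrArg _ h

theorem meet_exists {pl dl : List Int} (hG : Good pl dl) {x y : Nat} (hx : x < pl.length)
    (hy : y < pl.length) : itP pl pl.length x = itP pl pl.length y := by
  rw [good_it_eq_zero hG hx (le_trans (good_dN_le hG hx) (le_of_lt hx)),
      good_it_eq_zero hG hy (le_trans (good_dN_le hG hy) (le_of_lt hy))]

theorem meetMin_exists {pl dl : List Int} (hG : Good pl dl) {x y : Nat} (hx : x < pl.length)
    (hy : y < pl.length) : ∃ j, j ≤ pl.length ∧ MeetMin pl x y j := by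
  have hex : ∃ j, itP pl j x = itP pl j y := ⟨pl.length, meet_exists hG hx hy⟩
  exact ⟨Nat.find hex, Nat.find_le (meet_exists hG hx hy), Nat.find_spec hex,
    fun j' hj' => Nat.find_min hex hj'⟩

-- dict-invariant plumbing
theorem ancInv_insert {anc : ADict} {pl : List Int} (hI : AncInv anc pl) (xn kn : Nat)
    (hx : xn < pl.length) :
    AncInv (PySem.Dict.insert anc ((xn : Int), (kn : Int)) ((itP pl (2 ^ kn) xn : Nat) : Int)) pl := by
  obtain ⟨hS, hC⟩ := hI
  constructor
  · intro xi ki v hv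
    rw [PySem.Dict.get?_insert] at hv
    split_ifs at hv with he
    · obtain ⟨he1, he2⟩ := Prod.mk.injEq .. ▸ he
      exact ⟨xn, kn, he1, he2, hx, (Option.some.injEq .. ▸ hv).symm ▸ rfl⟩
    · exact hS xi ki v hv
  · intro z hz
    rw [PySem.Dict.get?_insert]
    split_ifs with he
    · obtain ⟨he1, he2⟩ := Prod.mk.injEq .. ▸ he
      have hz' : z = xn := Nat.cast_injective he1
      have hk' : kn = 0 := by exact_mod_cast he2.symm
      subst hz'; subst hk'
      have : itP pl (2 ^ 0) z = pP pl z := by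
        simp [itP]
      rw [this]
    · exact hC z hz

-- npo2 computes the 2^k-th ancestor (fuel = k suffices given the level-0 completeness)
theorem npo2_ok {pl dl : List Int} (hG : Good pl dl) :
    ∀ (k : Nat) (anc : ADict) (x : Nat), AncInv anc pl → x < pl.length →
    ∃ anc', npo2 anc (x : Int) (k : Int) k = some (((itP pl (2 ^ k) x : Nat) : Int), anc') ∧
      AncInv anc' pl := by
  intro k
  induction k with
  | zero =>
    intro anc x hI hx
    refine ⟨anc, ?_, hI⟩
    have hc := hI.2 x hx
    simp only [npo2, Nat.cast_zero, hc]
    have : itP pl (2 ^ 0) x = pP pl x := by simp [itP]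
    rw [this]
  | succ k ih =>
    intro anc x hI hx
    cases hv : PySem.Dict.get? anc ((x : Int), ((k + 1 : Nat) : Int)) with
    | some v =>
      obtain ⟨x', k', he1, he2, hx', hval⟩ := hI.1 _ _ _ hv
      have hxx : x' = x := Nat.cast_injective he1.symm
      have hkk : k' = k + 1 := Nat.cast_injective he2.symm
      refine ⟨anc, ?_, hI⟩
      simp only [npo2, hv]
      rw [hval, hxx, hkk]
    | none =>
      have hc1 : ((k + 1 : Nat) : Int) - 1 = (k : Int) := by push_cast; ring
      obtain ⟨anc1, e1, hI1⟩ := ih anc x hI hx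
      obtain ⟨anc2, e2, hI2⟩ := ih anc1 (itP pl (2 ^ k) x) hI1 (good_it_lt hG hx _)
      have hcomp : itP pl (2 ^ k) (itP pl (2 ^ k) x) = itP pl (2 ^ (k + 1)) x := by
        show (pP pl)^[2 ^ k] ((pP pl)^[2 ^ k] x) = (pP pl)^[2 ^ (k + 1)] x
        rw [← Function.iterate_add_apply]
        congr 1
        rw [pow_succ]
        omega
      refine ⟨PySem.Dict.insert anc2 ((x : Int), ((k + 1 : Nat) : Int))
        ((itP pl (2 ^ (k + 1)) x : Nat) : Int), ?_, ?_⟩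
      · simp only [npo2, hv, hc1, e1, e2, hcomp]
      · exact ancInv_insert hI2 x (k + 1) hx

-- the NthAncestor bit loop climbs by the bits ≥ k of n
theorem nthLoop_ok {pl dl : List Int} (hG : Good pl dl) :
    ∀ (fuel k : Nat) (anc : ADict) (x n' : Nat), AncInv anc pl → x < pl.length →
    n' < 2 ^ (k + fuel) →
    ∃ anc', nthLoop anc (x : Int) (n' : Int) k fuel =
        some (((itP pl (n' - n' % 2 ^ k) x : Nat) : Int), anc') ∧ AncInv anc' pl := by
  intro fuel
  induction fuel with
  | zero =>
    intro k anc x n' hI hx hn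
    have hg : ¬ ((2 : Int) ^ k ≤ (n' : Int)) := by
      rw [show ((2 : Int) ^ k) = ((2 ^ k : Nat) : Int) by push_cast; ring]
      rw [Nat.cast_le]
      have hn' : n' < 2 ^ k := by simpa using hn
      omega
    have hm : n' % 2 ^ k = n' := Nat.mod_eq_of_lt (by omega)
    refine ⟨anc, ?_, hI⟩
    simp only [nthLoop, if_neg hg, hm]
    simp [itP]
  | succ f ih =>
    intro k anc x n' hI hx hn
    by_cases hg : 2 ^ k ≤ n'
    case neg =>
      have hgn : ¬ ((2 : Int) ^ k ≤ (n' : Int)) := by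
        rw [show ((2 : Int) ^ k) = ((2 ^ k : Nat) : Int) by push_cast; ring, Nat.cast_le]
        omega
      have hm : n' % 2 ^ k = n' := Nat.mod_eq_of_lt (by omega)
      refine ⟨anc, ?_, hI⟩
      simp only [nthLoop, if_neg hgn, hm]
      simp [itP]
    · have hgi : (2 : Int) ^ k ≤ (n' : Int) := by
        rw [show ((2 : Int) ^ k) = ((2 ^ k : Nat) : Int) by push_cast; ring, Nat.cast_le]
        omega
      have hband : PySem.Int.band (n' : Int) ((2 : Int) ^ k) =
          (((n'.testBit k).toNat * 2 ^ k : Nat) : Int) := by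
        rw [show ((2 : Int) ^ k) = ((2 ^ k : Nat) : Int) by push_cast; ring]
        rw [PySem.Int.band_natCast]
        rw [Nat.and_two_pow]
      have hmodsucc : n' % 2 ^ (k + 1) = n' % 2 ^ k + 2 ^ k * (n' / 2 ^ k % 2) :=
        Nat.mod_pow_succ
      have hmlt : n' % 2 ^ k < 2 ^ k := Nat.mod_lt _ (Nat.two_pow_pos k)
      have hmle : n' % 2 ^ (k + 1) ≤ n' := Nat.mod_le _ _
      have hn2 : n' < 2 ^ (k + 1 + f) := by
        have : k + 1 + f = k + (f + 1) := by omega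
        rw [this]; exact hn
      cases hbit : n'.testBit k with
      | true =>
        have hdiv : n' / 2 ^ k % 2 = 1 := by
          have h' : n'.testBit k = decide (n' / 2 ^ k % 2 = 1) :=
            Nat.testBit_eq_decide_div_mod_eq
          rw [hbit] at h'
          exact of_decide_eq_true h'.symm
        obtain ⟨anc1, e1, hI1⟩ := npo2_ok hG k anc x hI hx
        obtain ⟨anc2, e2, hI2⟩ := ih (k + 1) anc1 (itP pl (2 ^ k) x) n' hI1
          (good_it_lt hG hx _) hn2
        refine ⟨anc2, ?_, hI2⟩
        have hit : itP pl (n' - n' % 2 ^ (k + 1)) (itP pl (2 ^ k) x) =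
            itP pl (n' - n' % 2 ^ k) x := by
          show (pP pl)^[n' - n' % 2 ^ (k + 1)] ((pP pl)^[2 ^ k] x) =
            (pP pl)^[n' - n' % 2 ^ k] x
          rw [← Function.iterate_add_apply]
          congr 1
          have hm1 := hmodsucc
          rw [hdiv] at hm1
          omega
        simp only [nthLoop, if_pos hgi, hband, hbit]
        norm_num
        rw [e1]
        simp only [e2, hit]
      | false =>
        have hdiv : n' / 2 ^ k % 2 = 0 := by
          have h' : n'.testBit k = decide (n' / 2 ^ k % 2 = 1) :=
            Nat.testBit_eq_decide_div_mod_eq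
          rw [hbit] at h'
          have h2 := Nat.mod_two_eq_zero_or_one (n' / 2 ^ k)
          rcases h2 with h2 | h2
          · exact h2
          · rw [h2] at h'; simp at h'
        obtain ⟨anc2, e2, hI2⟩ := ih (k + 1) anc x n' hI hx hn2
        refine ⟨anc2, ?_, hI2⟩
        have hmeq : n' % 2 ^ (k + 1) = n' % 2 ^ k := by
          rw [hmodsucc, hdiv]; simp
        rw [hmeq] at e2
        simp only [nthLoop, if_pos hgi, hband, hbit]
        norm_num
        simp only [e2]

-- the first LCA while-loop finds the minimal level with equal 2^k-ancestors
theorem searchK_ok {pl dl : List Int} (hG : Good pl dl) {x y K : Nat} (hx : x < pl.length)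
    (hy : y < pl.length) (hK : itP pl (2 ^ K) x = itP pl (2 ^ K) y)
    (hKmin : ∀ k < K, itP pl (2 ^ k) x ≠ itP pl (2 ^ k) y) :
    ∀ (fuel k : Nat) (anc : ADict), AncInv anc pl → k ≤ K → K < k + fuel →
    ∃ anc', searchK anc (x : Int) (y : Int) k fuel = some (K, anc') ∧ AncInv anc' pl := by
  intro fuel
  induction fuel with
  | zero => intro k anc _ hk hKf; omega
  | succ f ih =>
    intro k anc hI hk hKf
    obtain ⟨anc1, e1, hI1⟩ := npo2_ok hG k anc x hI hx
    obtain ⟨anc2, e2, hI2⟩ := npo2_ok hG k anc1 y hI1 hy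
    rcases Nat.lt_or_ge k K with hlt | hge
    · have hne : itP pl (2 ^ k) x ≠ itP pl (2 ^ k) y := hKmin k hlt
      obtain ⟨anc', e', hI'⟩ := ih (k + 1) anc2 hI2 (by omega) (by omega)
      refine ⟨anc', ?_, hI'⟩
      simp only [searchK, e1, e2]
      rw [if_pos (show ((itP pl (2 ^ k) x : Nat) : Int) ≠ ((itP pl (2 ^ k) y : Nat) : Int) from
        by exact_mod_cast hne)]
      exact e'
    · have hkK : k = K := by omega
      subst hkK
      refine ⟨anc2, ?_, hI2⟩
      simp only [searchK, e1, e2, hK]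
      simp

-- the second LCA while-loop: ends at distinct equal-depth nodes with a common parent
theorem descend_ok {pl dl : List Int} (hG : Good pl dl) :
    ∀ (k : Nat) (anc : ADict) (x y : Nat), AncInv anc pl → x < pl.length → y < pl.length →
    x ≠ y → itP pl (2 ^ k) x = itP pl (2 ^ k) y →
    ∃ (a x' y' : Nat) (anc' : ADict),
      descend anc (x : Int) (y : Int) k = some ((x' : Int), (y' : Int), anc') ∧
      x' = itP pl a x ∧ y' = itP pl a y ∧ x' ≠ y' ∧ pP pl x' = pP pl y' ∧
      x' < pl.length ∧ AncInv anc' pl := by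
  intro k
  induction k with
  | zero =>
    intro anc x y hI hx hy hne heq
    refine ⟨0, x, y, anc, rfl, by simp [itP], by simp [itP], hne, ?_, hx, hI⟩
    have h1 : itP pl 1 x = itP pl 1 y := by
      have : (2 : Nat) ^ 0 = 1 := rfl
      rw [← this]; exact heq
    simpa [itP] using h1
  | succ k ih =>
    intro anc x y hI hx hy hne heq
    obtain ⟨anc1, e1, hI1⟩ := npo2_ok hG k anc x hI hx
    obtain ⟨anc2, e2, hI2⟩ := npo2_ok hG k anc1 y hI1 hy
    by_cases hab : itP pl (2 ^ k) x = itP pl (2 ^ k) y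
    · obtain ⟨a, x', y', anc', e', ex, ey, hne', hpar, hlt', hI'⟩ :=
        ih anc2 x y hI2 hx hy hne hab
      refine ⟨a, x', y', anc', ?_, ex, ey, hne', hpar, hlt', hI'⟩
      simp only [descend, e1, e2]
      rw [if_neg (show ¬ ((itP pl (2 ^ k) x : Nat) : Int) ≠ ((itP pl (2 ^ k) y : Nat) : Int) from
        by simp [hab])]
      exact e'
    · have hcomp : ∀ z, itP pl (2 ^ k) (itP pl (2 ^ k) z) = itP pl (2 ^ (k + 1)) z := by
        intro z
        show (pP pl)^[2 ^ k] ((pP pl)^[2 ^ k] z) = (pP pl)^[2 ^ (k + 1)] z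
        rw [← Function.iterate_add_apply]
        congr 1
        rw [pow_succ]; omega
      have heq' : itP pl (2 ^ k) (itP pl (2 ^ k) x) = itP pl (2 ^ k) (itP pl (2 ^ k) y) := by
        rw [hcomp, hcomp]; exact heq
      obtain ⟨a, x', y', anc', e', ex, ey, hne', hpar, hlt', hI'⟩ :=
        ih anc2 (itP pl (2 ^ k) x) (itP pl (2 ^ k) y) hI2 (good_it_lt hG hx _)
          (good_it_lt hG hy _) hab heq'
      refine ⟨a + 2 ^ k, x', y', anc', ?_, ?_, ?_, hne', hpar, hlt', hI'⟩
      · simp only [descend, e1, e2]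
        rw [if_pos (show ((itP pl (2 ^ k) x : Nat) : Int) ≠ ((itP pl (2 ^ k) y : Nat) : Int) from
          by exact_mod_cast hab)]
        exact e'
      · rw [ex]
        show (pP pl)^[a] ((pP pl)^[2 ^ k] x) = (pP pl)^[a + 2 ^ k] x
        rw [← Function.iterate_add_apply]
      · rw [ey]
        show (pP pl)^[a] ((pP pl)^[2 ^ k] y) = (pP pl)^[a + 2 ^ k] y
        rw [← Function.iterate_add_apply]

theorem dl_get {pl dl : List Int} (hG : Good pl dl) {x : Nat} (hx : x < pl.length) :
    PySem.List.pyGet? dl (x : Int) = some ((dN dl x : Nat) : Int) := by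
  have hxd : x < dl.length := hG.1 ▸ hx
  rw [PySem.List.pyGet?_natCast, List.getElem?_eq_getElem hxd]
  rw [← List.getD_eq_getElem dl 0 hxd]
  rw [good_dl_eq hG hx]

theorem pl_get {pl dl : List Int} (hG : Good pl dl) {x : Nat} (hx : x < pl.length) :
    PySem.List.pyGet? pl (x : Int) = some ((pP pl x : Nat) : Int) := by
  rw [PySem.List.pyGet?_natCast, List.getElem?_eq_getElem hx]
  rw [← List.getD_eq_getElem pl 0 hx]
  rw [good_pl_eq hG hx]

theorem n_lt_two_pow_add_two (n : Nat) : n < 2 ^ (0 + (n + 2)) := by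
  have h1 : n < 2 ^ n := Nat.lt_two_pow_self
  have h2 : (2 : Nat) ^ n ≤ 2 ^ (0 + (n + 2)) := Nat.pow_le_pow_right (by omega) (by omega)
  omega

-- the depth-equalisation step of either program, as one lemma about A's conditional
theorem equalize_ok {pl dl : List Int} (hG : Good pl dl) {x y : Nat} (hx : x < pl.length)
    (_hy : y < pl.length) {anc : ADict} (hI : AncInv anc pl) :
    ∃ anc',
      (if ((dN dl x : Nat) : Int) > ((dN dl y : Nat) : Int) then
        nthLoop anc (x : Int) (((dN dl x : Nat) : Int) - ((dN dl y : Nat) : Int)) 0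
          ((((dN dl x : Nat) : Int) - ((dN dl y : Nat) : Int)).toNat + 2)
      else some ((x : Int), anc)) =
        some (((itP pl (dN dl x - dN dl y) x : Nat) : Int), anc') ∧ AncInv anc' pl := by
  by_cases hgt : dN dl y < dN dl x
  · have hc : ((dN dl x : Nat) : Int) - ((dN dl y : Nat) : Int) =
        ((dN dl x - dN dl y : Nat) : Int) := by push_cast [Nat.le_of_lt hgt]; ring
    have hgi : ((dN dl x : Nat) : Int) > ((dN dl y : Nat) : Int) := by exact_mod_cast hgt
    obtain ⟨anc', e, hI'⟩ := nthLoop_ok hG ((dN dl x - dN dl y) + 2) 0 anc x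
      (dN dl x - dN dl y) hI hx (n_lt_two_pow_add_two _)
    refine ⟨anc', ?_, hI'⟩
    rw [if_pos hgi, hc]
    simpa [Nat.mod_one] using e
  · have hle : dN dl x ≤ dN dl y := by omega
    have hz : dN dl x - dN dl y = 0 := by omega
    refine ⟨anc, ?_, hI⟩
    rw [if_neg (by exact_mod_cast hgt), hz]
    simp [itP]

-- A's LowestCommonAncestor: equalise depths, then the meet at the MeetMin time
theorem alca_ok {pl dl : List Int} (hG : Good pl dl) {x y : Nat} (hx : x < pl.length)
    (hy : y < pl.length) {anc : ADict} (hI : AncInv anc pl) :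
    ∃ (j : Nat) (anc' : ADict),
      MeetMin pl (itP pl (dN dl x - dN dl y) x) (itP pl (dN dl y - dN dl x) y) j ∧
      alca anc dl (x : Int) (y : Int) =
        some (((itP pl j (itP pl (dN dl x - dN dl y) x) : Nat) : Int), anc') ∧
      AncInv anc' pl := by
  set x1 := itP pl (dN dl x - dN dl y) x with hx1
  set y1 := itP pl (dN dl y - dN dl x) y with hy1
  have hx1l : x1 < pl.length := good_it_lt hG hx _
  have hy1l : y1 < pl.length := good_it_lt hG hy _
  obtain ⟨anc1, e1, hI1⟩ := equalize_ok hG hx hy hI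
  obtain ⟨anc2, e2, hI2⟩ := equalize_ok hG hy hx hI1
  by_cases heq : x1 = y1
  · refine ⟨0, anc2, ⟨by simp [itP, heq], fun j' hj' => absurd hj' (Nat.not_lt_zero _)⟩, ?_, hI2⟩
    simp only [alca, dl_get hG hx, dl_get hG hy, e1, e2]
    rw [if_pos (by exact_mod_cast heq)]
    simp only [itP, Function.iterate_zero, id]
    rfl
  · have hexK : ∃ k, itP pl (2 ^ k) x1 = itP pl (2 ^ k) y1 := by
      refine ⟨pl.length, ?_⟩
      have h2 : pl.length ≤ 2 ^ pl.length := Nat.le_of_lt Nat.lt_two_pow_self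
      rw [good_it_eq_zero hG hx1l (le_trans (good_dN_le hG hx1l) (le_trans (le_of_lt hx1l) h2)),
          good_it_eq_zero hG hy1l (le_trans (good_dN_le hG hy1l) (le_trans (le_of_lt hy1l) h2))]
    set K := Nat.find hexK with hKdef
    have hKspec := Nat.find_spec hexK
    have hKmin : ∀ k < K, itP pl (2 ^ k) x1 ≠ itP pl (2 ^ k) y1 :=
      fun k hk => Nat.find_min hexK hk
    have hKle : K ≤ pl.length := Nat.find_le (by
      have h2 : pl.length ≤ 2 ^ pl.length := Nat.le_of_lt Nat.lt_two_pow_self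
      rw [good_it_eq_zero hG hx1l (le_trans (good_dN_le hG hx1l) (le_trans (le_of_lt hx1l) h2)),
          good_it_eq_zero hG hy1l (le_trans (good_dN_le hG hy1l) (le_trans (le_of_lt hy1l) h2))])
    obtain ⟨anc3, e3, hI3⟩ := searchK_ok hG hx1l hy1l hKspec hKmin (dl.length + 1) 0 anc2 hI2
      (by omega) (by rw [← hG.1]; omega)
    obtain ⟨a, x2, y2, anc4, e4, ex2, ey2, hne2, hpar, hx2l, hI4⟩ :=
      descend_ok hG K anc3 x1 y1 hI3 hx1l hy1l heq hKspec
    have hget := hI4.2 x2 hx2l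
    have hval : itP pl (a + 1) x1 = pP pl x2 := by
      rw [ex2]
      show (pP pl)^[a + 1] x1 = pP pl ((pP pl)^[a] x1)
      exact Function.iterate_succ_apply' _ a x1
    have hvaly : itP pl (a + 1) y1 = pP pl y2 := by
      rw [ey2]
      show (pP pl)^[a + 1] y1 = pP pl ((pP pl)^[a] y1)
      exact Function.iterate_succ_apply' _ a y1
    refine ⟨a + 1, anc4, ⟨by rw [hval, hvaly, hpar], ?_⟩, ?_, hI4⟩
    · intro j' hj' hj'eq
      have : itP pl a x1 = itP pl a y1 := it_persist hj'eq (by omega)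
      rw [← ex2, ← ey2] at this
      exact hne2 this
    · simp only [alca, dl_get hG hx, dl_get hG hy, e1, e2]
      rw [if_neg (show ¬ ((x1 : Nat) : Int) = ((y1 : Nat) : Int) from by exact_mod_cast heq)]
      rw [← hx1, ← hy1]
      rw [hKdef] at e4
      simp only [e3, e4, hget, hval]

-- B's climbing loop
theorem bclimb_ok {pl dl : List Int} (hG : Good pl dl) {y : Nat} (hy : y < pl.length) :
    ∀ (fuel x : Nat), x < pl.length → dN dl x ≤ fuel →
    bclimb pl dl (x : Int) (y : Int) fuel = some ((itP pl (dN dl x - dN dl y) x : Nat) : Int) := by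
  intro fuel
  induction fuel with
  | zero =>
    intro x hx hf
    have hd0 : dN dl x = 0 := by omega
    have hle : dN dl x ≤ dN dl y := by omega
    simp only [bclimb, dl_get hG hx, dl_get hG hy]
    rw [if_neg (show ¬ ((dN dl x : Nat) : Int) > ((dN dl y : Nat) : Int) from by
      exact_mod_cast not_lt.mpr hle)]
    have : dN dl x - dN dl y = 0 := by omega
    rw [this]
    simp [itP]
  | succ f ih =>
    intro x hx hf
    by_cases hgt : dN dl y < dN dl x
    · have hx0 : 0 < x := by
        rcases Nat.eq_zero_or_pos x with h0 | h0
        · rw [h0, good_dN_zero hG] at hgt; omega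
        · exact h0
      have hsucc := good_dN_succ hG hx0 hx
      have hrec := ih (pP pl x) (good_P_lt hG hx) (by omega)
      simp only [bclimb, dl_get hG hx, dl_get hG hy]
      rw [if_pos (show ((dN dl x : Nat) : Int) > ((dN dl y : Nat) : Int) from by
        exact_mod_cast hgt)]
      rw [pl_get hG hx]
      show bclimb pl dl ((pP pl x : Nat) : Int) ((y : Nat) : Int) f = _
      rw [hrec]
      congr 2
      show (pP pl)^[dN dl (pP pl x) - dN dl y] (pP pl x) = (pP pl)^[dN dl x - dN dl y] x
      rw [← Function.iterate_succ_apply]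
      congr 1
      omega
    · simp only [bclimb, dl_get hG hx, dl_get hG hy]
      rw [if_neg (show ¬ ((dN dl x : Nat) : Int) > ((dN dl y : Nat) : Int) from by
        exact_mod_cast hgt)]
      have : dN dl x - dN dl y = 0 := by omega
      rw [this]
      simp [itP]

-- B's joint climbing loop
theorem bjoint_ok {pl dl : List Int} (hG : Good pl dl) :
    ∀ (fuel x y : Nat), x < pl.length → y < pl.length →
    (∃ j ≤ fuel, itP pl j x = itP pl j y) →
    ∃ j, MeetMin pl x y j ∧ bjoint pl (x : Int) (y : Int) fuel = some ((itP pl j x : Nat) : Int) := by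
  intro fuel
  induction fuel with
  | zero =>
    intro x y hx hy hex
    obtain ⟨j, hj, hjeq⟩ := hex
    have hj0 : j = 0 := by omega
    rw [hj0] at hjeq
    have hxy : x = y := by simpa [itP] using hjeq
    refine ⟨0, ⟨by simpa [itP] using hxy, fun j' hj' => absurd hj' (Nat.not_lt_zero _)⟩, ?_⟩
    simp only [bjoint, if_pos (show ((x : Nat) : Int) = ((y : Nat) : Int) from by
      exact_mod_cast hxy)]
    simp [itP]
  | succ f ih =>
    intro x y hx hy hex
    by_cases hxy : x = y
    · refine ⟨0, ⟨by simpa [itP] using hxy, fun j' hj' => absurd hj' (Nat.not_lt_zero _)⟩, ?_⟩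
      simp only [bjoint, if_pos (show ((x : Nat) : Int) = ((y : Nat) : Int) from by
        exact_mod_cast hxy)]
      simp [itP]
    · obtain ⟨j, hj, hjeq⟩ := hex
      have hj0 : 0 < j := by
        rcases Nat.eq_zero_or_pos j with h0 | h0
        · rw [h0] at hjeq; simp [itP] at hjeq; exact absurd hjeq hxy
        · exact h0
      have hex' : ∃ j' ≤ f, itP pl j' (pP pl x) = itP pl j' (pP pl y) := by
        refine ⟨j - 1, by omega, ?_⟩
        have h1 : itP pl (j - 1) (pP pl x) = itP pl j x := by
          show (pP pl)^[j - 1] (pP pl x) = (pP pl)^[j] x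
          rw [← Function.iterate_succ_apply]
          congr 1; omega
        have h2 : itP pl (j - 1) (pP pl y) = itP pl j y := by
          show (pP pl)^[j - 1] (pP pl y) = (pP pl)^[j] y
          rw [← Function.iterate_succ_apply]
          congr 1; omega
        rw [h1, h2]; exact hjeq
      obtain ⟨j', hmm', hrec⟩ := ih (pP pl x) (pP pl y) (good_P_lt hG hx) (good_P_lt hG hy) hex'
      refine ⟨j' + 1, ⟨?_, ?_⟩, ?_⟩
      · have h1 : itP pl (j' + 1) x = itP pl j' (pP pl x) := Function.iterate_succ_apply _ j' x
        have h2 : itP pl (j' + 1) y = itP pl j' (pP pl y) := Function.iterate_succ_apply _ j' y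
        rw [h1, h2]; exact hmm'.1
      · intro j'' hj'' hj''eq
        rcases Nat.eq_zero_or_pos j'' with h0 | h0
        · rw [h0] at hj''eq; simp [itP] at hj''eq; exact hxy hj''eq
        · have h1 : itP pl (j'' - 1) (pP pl x) = itP pl j'' x := by
            show (pP pl)^[j'' - 1] (pP pl x) = (pP pl)^[j''] x
            rw [← Function.iterate_succ_apply]; congr 1; omega
          have h2 : itP pl (j'' - 1) (pP pl y) = itP pl j'' y := by
            show (pP pl)^[j'' - 1] (pP pl y) = (pP pl)^[j''] y
            rw [← Function.iterate_succ_apply]; congr 1; omega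
          exact hmm'.2 (j'' - 1) (by omega) (by rw [h1, h2]; exact hj''eq)
      · simp only [bjoint, if_neg (show ¬ ((x : Nat) : Int) = ((y : Nat) : Int) from by
          exact_mod_cast hxy)]
        rw [pl_get hG hx, pl_get hG hy]
        show bjoint pl ((pP pl x : Nat) : Int) ((pP pl y : Nat) : Int) f = _
        rw [hrec]
        have hstep : itP pl j' (pP pl x) = itP pl (j' + 1) x :=
          (Function.iterate_succ_apply _ j' x).symm
        rw [hstep]

theorem blca_ok {pl dl : List Int} (hG : Good pl dl) {x y : Nat} (hx : x < pl.length)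
    (hy : y < pl.length) :
    ∃ j, MeetMin pl (itP pl (dN dl x - dN dl y) x) (itP pl (dN dl y - dN dl x) y) j ∧
      blca pl dl (x : Int) (y : Int) =
        some ((itP pl j (itP pl (dN dl x - dN dl y) x) : Nat) : Int) := by
  have hx1l : itP pl (dN dl x - dN dl y) x < pl.length := good_it_lt hG hx _
  have hy1l : itP pl (dN dl y - dN dl x) y < pl.length := good_it_lt hG hy _
  have e1 := bclimb_ok hG hy pl.length x hx (le_trans (good_dN_le hG hx) (le_of_lt hx))
  have e2 := bclimb_ok hG hx1l pl.length y hy (le_trans (good_dN_le hG hy) (le_of_lt hy))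
  have hdeq : dN dl y - dN dl (itP pl (dN dl x - dN dl y) x) = dN dl y - dN dl x := by
    have := good_dN_it hG hx (dN dl x - dN dl y)
    omega
  rw [hdeq] at e2
  obtain ⟨j0, hj0, hmm0⟩ := meetMin_exists hG hx1l hy1l
  obtain ⟨j, hmm, e3⟩ := bjoint_ok hG pl.length _ _ hx1l hy1l ⟨j0, hj0, hmm0.1⟩
  refine ⟨j, hmm, ?_⟩
  simp only [blca, e1, e2, e3]

-- both LCAs agree
theorem lca_both {pl dl : List Int} (hG : Good pl dl) {x y : Nat} (hx : x < pl.length)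
    (hy : y < pl.length) {anc : ADict} (hI : AncInv anc pl) :
    ∃ (L : Nat) (anc' : ADict), L < pl.length ∧
      alca anc dl (x : Int) (y : Int) = some ((L : Int), anc') ∧
      blca pl dl (x : Int) (y : Int) = some ((L : Int)) ∧ AncInv anc' pl := by
  obtain ⟨ja, anc', hmma, ea, hIa⟩ := alca_ok hG hx hy hI
  obtain ⟨jb, hmmb, eb⟩ := blca_ok hG hx hy
  have hj : ja = jb := meetMin_unique hmma hmmb
  subst hj
  exact ⟨itP pl ja (itP pl (dN dl x - dN dl y) x), anc',
    good_it_lt hG (good_it_lt hG hx _) _, ea, eb, hIa⟩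

theorem fold_both {pl dl : List Int} (hG : Good pl dl) :
    ∀ (t : List Int) (anc : ADict) (acc : Nat), AncInv anc pl → acc < pl.length →
    (∀ e ∈ t, 0 ≤ e ∧ e < (pl.length : Int)) →
    ∃ (L : Nat) (anc' : ADict), L < pl.length ∧
      afold anc dl (acc : Int) t = some ((L : Int), anc') ∧
      bfold pl dl (acc : Int) t = some ((L : Int)) ∧ AncInv anc' pl := by
  intro t
  induction t with
  | nil =>
    intro anc acc hI hacc _
    exact ⟨acc, anc, hacc, rfl, rfl, hI⟩
  | cons z t ih =>
    intro anc acc hI hacc hb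
    obtain ⟨hz0, hzlt⟩ := hb z (by simp)
    obtain ⟨zn, rfl⟩ : ∃ zn : Nat, z = (zn : Int) := ⟨z.toNat, (Int.toNat_of_nonneg hz0).symm⟩
    have hzn : zn < pl.length := by exact_mod_cast hzlt
    obtain ⟨L1, anc1, hL1, ea, eb, hI1⟩ := lca_both hG hacc hzn hI
    obtain ⟨L, anc', hL, ea', eb', hI'⟩ := ih anc1 L1 hI1 hL1
      (fun e he => hb e (by simp [he]))
    exact ⟨L, anc', hL, by simp only [afold, ea]; exact ea',
      by simp only [bfold, eb]; exact eb', hI'⟩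

-- extension of the structure by one node
theorem pP_extend {pl : List Int} {v : Int} {x : Nat} (hx : x < pl.length) :
    pP (pl ++ [v]) x = pP pl x := by
  simp only [pP]
  rw [List.getD_append _ _ _ _ hx]

theorem itP_extend {pl dl : List Int} (hG : Good pl dl) {v : Int} {x : Nat} (hx : x < pl.length)
    (n : Nat) : itP (pl ++ [v]) n x = itP pl n x := by
  induction n with
  | zero => simp [itP]
  | succ n ih =>
    have h1 : itP (pl ++ [v]) (n + 1) x = pP (pl ++ [v]) (itP (pl ++ [v]) n x) :=
      Function.iterate_succ_apply' _ n x
    have h2 : itP pl (n + 1) x = pP pl (itP pl n x) := Function.iterate_succ_apply' _ n x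
    rw [h1, h2, ih, pP_extend (good_it_lt hG hx n)]

theorem good_extend {pl dl : List Int} (hG : Good pl dl) {L : Nat} (hL : L < pl.length) :
    Good (pl ++ [(L : Int)]) (dl ++ [(dN dl L : Int) + 1]) := by
  have hdlL := good_dl_eq hG hL
  obtain ⟨hlen, hpos, hp0, hd0, hrec⟩ := hG
  have hL' : L < dl.length := hlen ▸ hL
  refine ⟨by simp [hlen], by simp, ?_, ?_, ?_⟩
  · rw [List.getD_append _ _ _ _ (by omega)]; exact hp0
  · rw [List.getD_append _ _ _ _ (by omega)]; exact hd0
  · intro i hi0 hi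
    simp only [List.length_append, List.length_cons, List.length_nil] at hi
    rcases Nat.lt_or_ge i pl.length with hilt | hige
    · obtain ⟨h1, h2, h3⟩ := hrec i hi0 hilt
      have hplt : (pl.getD i 0).toNat < dl.length := by omega
      rw [List.getD_append _ _ _ _ hilt, List.getD_append _ _ _ _ (hlen ▸ hilt),
          List.getD_append _ _ _ _ (by omega : (pl.getD i 0).toNat < dl.length)]
      exact ⟨h1, h2, h3⟩
    · have hieq : i = pl.length := by omega
      subst hieq
      rw [List.getD_append_right _ _ _ _ (le_refl _)]
      simp only [Nat.sub_self, List.getD_cons_zero]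
      refine ⟨by positivity, by simpa using hL, ?_⟩
      rw [show (((L : Int)).toNat) = L by simp]
      rw [List.getD_append_right _ _ _ _ (by omega : dl.length ≤ pl.length),
          List.getD_append _ _ _ _ (by omega : L < dl.length)]
      have hsub : pl.length - dl.length = 0 := by omega
      rw [hsub]
      simp only [List.getD_cons_zero]
      rw [hdlL]

theorem ancInv_extend {pl dl : List Int} (hG : Good pl dl) {anc : ADict} (hI : AncInv anc pl)
    {L : Nat} (_hL : L < pl.length) :
    AncInv (PySem.Dict.insert anc ((pl.length : Int), (0 : Int)) (L : Int)) (pl ++ [(L : Int)]) := by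
  have hplen : (pl ++ [(L : Int)]).length = pl.length + 1 := by simp
  have hpPm : pP (pl ++ [(L : Int)]) pl.length = L := by
    simp only [pP]
    rw [List.getD_append_right _ _ _ _ (le_refl _)]
    simp
  constructor
  · intro xi ki v hv
    rw [PySem.Dict.get?_insert] at hv
    split_ifs at hv with he
    · obtain ⟨he1, he2⟩ := Prod.mk.injEq .. ▸ he
      refine ⟨pl.length, 0, he1, by exact_mod_cast he2, by omega, ?_⟩
      have : itP (pl ++ [(L : Int)]) (2 ^ 0) pl.length = L := by
        simpa [itP] using hpPm
      rw [this]
      exact (Option.some.injEq .. ▸ hv).symm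
    · obtain ⟨x, k, hxe, hke, hxl, hve⟩ := hI.1 xi ki v hv
      exact ⟨x, k, hxe, hke, by omega, by
        rw [hve, itP_extend hG hxl]⟩
  · intro z hz
    rw [hplen] at hz
    rw [PySem.Dict.get?_insert]
    split_ifs with he
    · obtain ⟨he1, _⟩ := Prod.mk.injEq .. ▸ he
      have hz' : z = pl.length := Nat.cast_injective he1
      subst hz'
      rw [hpPm]
    · have hzlt : z < pl.length := by
        rcases Nat.lt_or_ge z pl.length with h | h
        · exact h
        · exfalso
          exact he (by rw [show z = pl.length by omega])
      rw [hI.2 z hzlt, pP_extend hzlt]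

-- validity of the remaining rows
def RowsOk : List (List Int) → Nat → Prop
  | [], _ => True
  | s :: rest, i => s ≠ [] ∧ (∀ e ∈ s, 0 ≤ e ∧ e < (i : Int)) ∧ RowsOk rest (i + 1)

theorem main_both : ∀ (rows : List (List Int)) (anc : ADict) (pl dl : List Int) (ans : Int),
    Good pl dl → AncInv anc pl → RowsOk rows pl.length →
    amain anc dl ans (pl.length : Int) rows = bmain pl dl ans rows := by
  intro rows
  induction rows with
  | nil => intro anc pl dl ans _ _ _; rfl
  | cons s rest ih =>
    intro anc pl dl ans hG hI hR
    obtain ⟨hne, hbound, hrest⟩ := hR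
    match s, hne with
    | h :: t, _ =>
      obtain ⟨hh0, hhlt⟩ := hbound h (by simp)
      obtain ⟨hn, rfl⟩ : ∃ hn : Nat, h = (hn : Int) := ⟨h.toNat, (Int.toNat_of_nonneg hh0).symm⟩
      have hhn : hn < pl.length := by exact_mod_cast hhlt
      obtain ⟨L, anc1, hL, ea, eb, hI1⟩ := fold_both hG t anc hn hI hhn
        (fun e he => hbound e (by simp [he]))
      have hdl := dl_get hG hL
      have hGe := good_extend hG hL
      have hIe := ancInv_extend hG hI1 hL
      have hRe : RowsOk rest (pl ++ [(L : Int)]).length := by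
        simpa using hrest
      have hrec := ih (PySem.Dict.insert anc1 ((pl.length : Int), (0 : Int)) (L : Int))
        (pl ++ [(L : Int)]) (dl ++ [((dN dl L : Nat) : Int) + 1])
        (ans + ((dN dl L : Nat) : Int)) hGe hIe hRe
      simp only [amain, bmain, ea, eb, hdl]
      have hcast : (((pl ++ [(L : Int)]).length : Nat) : Int) = (pl.length : Int) + 1 := by
        simp
      rw [hcast] at hrec
      exact hrec

theorem pre_rowsOk : ∀ (rows : List (List Int)) (i : Nat), 1 ≤ i →
    (∀ q ∈ rows.zipIdx i, 1 ≤ q.2 → q.1 ≠ [] ∧ ∀ e ∈ q.1, 0 ≤ e ∧ e < (q.2 : Int)) →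
    RowsOk rows i := by
  intro rows
  induction rows with
  | nil => intro i _ _; trivial
  | cons s rest ih =>
    intro i hi hall
    rw [List.zipIdx_cons] at hall
    refine ⟨?_, ?_, ?_⟩
    · exact (hall (s, i) (by simp) hi).1
    · exact (hall (s, i) (by simp) hi).2
    · exact ih (i + 1) (by omega) (fun q hq => hall q (by simp [hq]))

theorem good_init : Good [(0 : Int)] [(0 : Int)] := by
  refine ⟨rfl, by simp, rfl, rfl, ?_⟩
  intro x hx0 hx1
  simp at hx1
  omega

theorem ancInv_init :
    AncInv (PySem.Dict.insert PySem.Dict.empty ((0 : Int), (0 : Int)) 0) [(0 : Int)] := by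
  constructor
  · intro xi ki v hv
    rw [PySem.Dict.get?_insert] at hv
    split_ifs at hv with he
    · obtain ⟨he1, he2⟩ := Prod.mk.injEq .. ▸ he
      refine ⟨0, 0, by exact_mod_cast he1, by exact_mod_cast he2, by simp, ?_⟩
      have hv' : v = 0 := (Option.some.inj hv).symm
      rw [hv']
      rfl
    · rw [PySem.Dict.get?_empty] at hv
      exact absurd hv (by simp)
  · intro x hx
    simp only [List.length_cons, List.length_nil] at hx
    have hx0 : x = 0 := by omega
    subst hx0
    rw [PySem.Dict.get?_insert]
    simp [pP]

-- ===== VERDICT (by name: the statement is the Claim_ definition above) =====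
theorem Part2_spec : Claim_equal_Part2 := by
  intro sb _hDom hPre
  show Part2 sb = Part2_alt sb
  have hR : RowsOk (sb.drop 1) 1 := by
    apply pre_rowsOk (sb.drop 1) 1 (le_refl 1)
    intro q hq hq1
    match sb, hq with
    | s0 :: rest, hq =>
      have : q ∈ (s0 :: rest).zipIdx := by
        rw [List.zipIdx_cons]
        simp only [List.drop_succ_cons, List.drop_zero] at hq
        exact List.mem_cons_of_mem _ hq
      exact hPre q this hq1
  have hmain := main_both (sb.drop 1)
    (PySem.Dict.insert PySem.Dict.empty ((0 : Int), (0 : Int)) 0)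
    [(0 : Int)] [(0 : Int)] 0 good_init ancInv_init (by simpa using hR)
  simp only [Part2, Part2_alt]
  rw [show ((([(0 : Int)] : List Int).length : Nat) : Int) = 1 by rfl] at hmain
  rw [hmain]
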